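-- pv_equiv track=rewrite | github.com/AgenticFinLab/multiagent-entropy | maep/language/react_utils.py | is_final_answer
-- ===== SOURCE A (Python) =====
-- def is_final_answer(response: str) -> bool:
--     """
--     Check if the model output contains a final answer indicator.
--
--     Args:
--         response: The model output text to check.
--
--     Returns:
--         True if a final answer indicator is found, False otherwise.
--     """
--     indicators = [
--         "Final Answer:",
--         "FINAL ANSWER:",
--         "final answer:",
--         "\\boxed{",
--         "\\boxed ",
--     ]
--     return any(indicator in response for indicator in indicators)
-- ===== SOURCE B (Python) =====
-- def is_final_answer(response: str) -> bool:
--     """One left-to-right scan: at each position test whether any indicator starts there."""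
--     indicators = (
--         "Final Answer:",
--         "FINAL ANSWER:",
--         "final answer:",
--         "\\boxed{",
--         "\\boxed ",
--     )
--     for i in range(len(response)):
--         if response.startswith(indicators, i):
--             return True
--     return False
-- ===== Notes on version B (the rewrite author's own statement) =====
-- stated objective: alternative
-- what changed: A runs five independent substring searches ('in' per indicator); B makes a single left-to-right scan of the text, testing at each position whether any of the five indicators starts there (one str.startswith with a tuple).
import Mathlib
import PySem

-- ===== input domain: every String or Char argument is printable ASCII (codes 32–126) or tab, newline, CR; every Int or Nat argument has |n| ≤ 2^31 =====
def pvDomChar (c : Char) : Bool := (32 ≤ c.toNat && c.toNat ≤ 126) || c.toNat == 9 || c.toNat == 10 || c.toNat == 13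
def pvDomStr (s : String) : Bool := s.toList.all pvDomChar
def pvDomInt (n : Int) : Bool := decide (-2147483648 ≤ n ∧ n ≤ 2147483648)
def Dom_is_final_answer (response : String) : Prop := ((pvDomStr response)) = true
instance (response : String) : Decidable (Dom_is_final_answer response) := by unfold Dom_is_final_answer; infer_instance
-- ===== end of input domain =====

-- ===== PORT A =====
-- B differs from A only in traversal strategy (five substring searches vs one positional scan).
def is_final_answer (response : String) : Bool :=
  (["Final Answer:", "FINAL ANSWER:", "final answer:", "\\boxed{", "\\boxed "] : List String).any
    (fun indicator => PySem.Str.isIn indicator response)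

-- ===== PORT B =====
def altIndicators : List (List Char) :=
  ["Final Answer:".toList, "FINAL ANSWER:".toList, "final answer:".toList,
   "\\boxed{".toList, "\\boxed ".toList]

-- the loop 'for i in range(len(response)): if response.startswith(indicators, i)'
def altScan (s : List Char) : Bool :=
  match s with
  | [] => false
  | _ :: rest =>
      if altIndicators.any (fun ind => PySem.Chars.startswith s ind) then true
      else altScan rest

def is_final_answer_alt (response : String) : Bool :=
  altScan response.toList

-- ===== PRECONDITION & SPEC =====
def Spec_is_final_answer (response : String) (out : Bool) : Prop := out = is_final_answer_alt response
instance (response : String) (out : Bool) : Decidable (Spec_is_final_answer response out) := by unfold Spec_is_final_answer; infer_instance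

-- ===== CLAIM (what is proved, stated in full; the proofs are below) =====
def Claim_equal_is_final_answer : Prop := ∀ (response : String), Dom_is_final_answer response → Spec_is_final_answer response (is_final_answer response)

-- ===== LEMMAS AND PROOFS =====

theorem altScan_iff (l : List Char) :
    altScan l = true ↔ ∃ ind ∈ altIndicators, ind <:+: l := by
  induction l with
  | nil =>
      simp only [altScan]
      constructor
      · intro h; exact absurd h (by decide)
      · rintro ⟨ind, hmem, hinf⟩
        have : ind = [] := List.infix_nil.mp hinf
        subst this
        revert hmem; decide
  | cons a rest ih =>
      simp only [altScan]
      split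
      · rename_i h
        simp only [List.any_eq_true, PySem.Chars.startswith_iff] at h
        obtain ⟨ind, hmem, hpre⟩ := h
        exact iff_of_true rfl ⟨ind, hmem, hpre.isInfix⟩
      · rename_i h
        simp only [List.any_eq_true, PySem.Chars.startswith_iff] at h
        push Not at h
        rw [ih]
        constructor
        · rintro ⟨ind, hmem, hinf⟩; exact ⟨ind, hmem, hinf.trans ((List.suffix_cons a rest).isInfix)⟩
        · rintro ⟨ind, hmem, hinf⟩
          rcases (List.infix_cons_iff).mp hinf with hpre | hinf'
          · exact absurd hpre (h ind hmem)
          · exact ⟨ind, hmem, hinf'⟩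

-- ===== VERDICT (by name: the statement is the Claim_ definition above) =====
theorem is_final_answer_spec : Claim_equal_is_final_answer := by
  intro response _
  unfold Spec_is_final_answer
  rw [Bool.eq_iff_iff]
  unfold is_final_answer is_final_answer_alt
  rw [altScan_iff]
  simp only [List.any_eq_true, PySem.Str.isIn_iff_infix, altIndicators]
  constructor
  · rintro ⟨ind, hmem, hinf⟩
    fin_cases hmem <;> exact ⟨_, by simp, hinf⟩
  · rintro ⟨ind, hmem, hinf⟩
    fin_cases hmem <;> exact ⟨_, by simp, hinf⟩
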